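-- pv_equiv track=rewrite | github.com/bdaene/advent-of-code | 2020/day24/solve_fast.py | apply
-- ===== SOURCE A (Python) =====
-- from collections import defaultdict, Counter
--
-- directions = {'e': (1, 0),
--               'se': (1, -1),
--               'sw': (0, -1),
--               'w': (-1, 0),
--               'nw': (-1, 1),
--               'ne': (0, 1)}
--
-- def apply(instructions):
--     black_tiles = defaultdict(bool)
--     for instruction in instructions:
--         u, v = 0, 0
--         for direction in instruction:
--             du, dv = directions[direction]
--             u += du
--             v += dv
--         black_tiles[(u, v)] ^= True
--     return black_tiles
-- ===== SOURCE B (Python) =====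
-- from collections import defaultdict, Counter
--
-- def tile(instruction):
--     # closed-form coordinate from the multiset of direction labels:
--     # e=(1,0), se=(1,-1), sw=(0,-1), w=(-1,0), nw=(-1,1), ne=(0,1)
--     c = Counter(instruction)
--     return (c['e'] + c['se'] - c['w'] - c['nw'],
--             c['ne'] + c['nw'] - c['se'] - c['sw'])
--
-- def apply(instructions):
--     tiles = [tile(instruction) for instruction in instructions]
--     black_tiles = defaultdict(bool)
--     for t in tiles:
--         black_tiles[t] = tiles.count(t) % 2 == 1
--     return black_tiles
-- ===== Notes on version B (the rewrite author's own statement) =====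
-- stated objective: alternative
-- what changed: B drops the direction-vector table and the per-step vector-sum loop, computing each tile by a closed-form formula over a Counter of direction labels, and replaces A's incremental in-place XOR toggle by assigning each tile the parity of its total occurrence count in the tile list.
import Mathlib
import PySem

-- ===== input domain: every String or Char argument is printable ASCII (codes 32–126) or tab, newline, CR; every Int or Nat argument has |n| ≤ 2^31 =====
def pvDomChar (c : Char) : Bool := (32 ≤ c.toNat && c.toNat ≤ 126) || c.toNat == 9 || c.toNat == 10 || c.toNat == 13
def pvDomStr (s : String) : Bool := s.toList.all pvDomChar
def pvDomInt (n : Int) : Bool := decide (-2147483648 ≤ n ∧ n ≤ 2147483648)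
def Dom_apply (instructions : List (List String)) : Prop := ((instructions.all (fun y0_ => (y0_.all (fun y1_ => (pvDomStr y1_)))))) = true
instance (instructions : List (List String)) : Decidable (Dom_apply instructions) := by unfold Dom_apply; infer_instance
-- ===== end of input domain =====

-- B drops A's direction-vector table and vector-sum loop: it computes each tile by a closed-form
-- formula over a Counter of direction labels, and colours a tile by the parity of its total
-- occurrence count in the tile list instead of A's incremental in-place XOR toggle (alternative).

-- ===== PORT A =====
-- the module-level `directions` dict (used by A)
def dirsDict : PySem.Dict String (Int × Int) :=
  PySem.Dict.ofList [("e", (1, 0)), ("se", (1, -1)), ("sw", (0, -1)),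
                     ("w", (-1, 0)), ("nw", (-1, 1)), ("ne", (0, 1))]

-- A's inner loop `for direction in instruction: du, dv = directions[direction]; u += du; v += dv`;
-- on a missing key Python raises KeyError — Pre_apply excludes exactly those inputs, so the
-- `none` branch is never reached inside Pre_.
def finalTile (instruction : List String) : Int × Int :=
  instruction.foldl (fun p d =>
    match dirsDict.get? d with
    | some dv => (p.1 + dv.1, p.2 + dv.2)
    | none => p) (0, 0)

def apply (instructions : List (List String)) : List (Int × Int × Bool) :=
  let black := instructions.foldl (fun (b : PySem.Dict (Int × Int) Bool) instruction =>
      let uv := finalTile instruction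
      b.insert uv (!(b.getD uv false))) PySem.Dict.empty
  black.items.map (fun p => (p.1.1, p.1.2, p.2))

-- ===== PORT B =====
-- Source B's `tile`: Counter of labels, then the closed-form coordinate (Counter yields 0 for a
-- missing label, so B never raises).
def tileB (instruction : List String) : Int × Int :=
  let c := PySem.Dict.counter instruction
  (c.getD "e" 0 + c.getD "se" 0 - c.getD "w" 0 - c.getD "nw" 0,
   c.getD "ne" 0 + c.getD "nw" 0 - c.getD "se" 0 - c.getD "sw" 0)

def apply_alt (instructions : List (List String)) : List (Int × Int × Bool) :=
  let tiles := instructions.map tileB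
  let black := tiles.foldl (fun (b : PySem.Dict (Int × Int) Bool) t =>
      b.insert t (decide (PySem.Int.mod (PySem.List.count tiles t) 2 = 1))) PySem.Dict.empty
  black.items.map (fun p => (p.1.1, p.1.2, p.2))

-- ===== PRECONDITION & SPEC =====
-- Pre_apply excludes exactly the inputs on which the Python A raises KeyError
-- (a direction string that is not one of the six hex directions).
def Pre_apply (instructions : List (List String)) : Prop :=
  (instructions.all (fun instruction => instruction.all
    (fun d => d ∈ ["e", "se", "sw", "w", "nw", "ne"]))) = true
instance (instructions : List (List String)) : Decidable (Pre_apply instructions) := by unfold Pre_apply; infer_instance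

def pvWitness_apply : List (List String) := [["e", "ne"], ["w"], ["ne", "e"]]

def Spec_apply (instructions : List (List String)) (out : List (Int × Int × Bool)) : Prop := out = apply_alt instructions
instance (instructions : List (List String)) (out : List (Int × Int × Bool)) : Decidable (Spec_apply instructions out) := by unfold Spec_apply; infer_instance

-- ===== CLAIM (what is proved, stated in full; the proofs are below) =====
def Claim_equal_apply : Prop := ∀ (instructions : List (List String)), Dom_apply instructions → Pre_apply instructions → Spec_apply instructions (apply instructions)

-- ===== LEMMAS AND PROOFS =====

-- A's toggle loop, characterised: key set = distinct tiles in first-occurrence order,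
-- value = parity of the tile's multiplicity.
theorem toggle_items (ps : List (Int × Int)) :
    (ps.foldl (fun (b : PySem.Dict (Int × Int) Bool) k => b.insert k (!(b.getD k false)))
      PySem.Dict.empty).items
    = (PySem.Set.ofList ps).map (fun k => (k, decide (ps.count k % 2 = 1))) := by
  induction ps using List.reverseRecOn with
  | nil => rfl
  | append_singleton ps x ih =>
    rw [List.foldl_append]
    set D := ps.foldl (fun (b : PySem.Dict (Int × Int) Bool) k => b.insert k (!(b.getD k false))) PySem.Dict.empty with hD
    have hkeys : D.keys = PySem.Set.ofList ps := by
      rw [hD, PySem.Dict.keys_foldl_insert]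
      simp [PySem.Set.update_nil_left]
    have hnd : D.keys.Nodup := by rw [hkeys]; exact PySem.Set.nodup_ofList ps
    rw [PySem.Set.ofList_append_singleton]
    by_cases hx : x ∈ PySem.Set.ofList ps
    · have hcont : D.contains x = true := by
        rw [PySem.Dict.contains_iff_mem_keys, hkeys]; exact hx
      have hgd : D.getD x false = decide (ps.count x % 2 = 1) := by
        refine PySem.Dict.getD_of_mem_items D ?_ hnd false
        rw [ih]
        exact List.mem_map_of_mem hx
      rw [List.foldl_cons, List.foldl_nil, PySem.Dict.items_insert_of_contains D _ hcont,
        PySem.Set.add_of_mem hx, ih, List.map_map, hgd]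
      apply List.map_congr_left
      intro k hk
      by_cases hkx : k = x
      · subst hkx
        simp only [Function.comp, beq_self_eq_true, if_pos]
        have hc1 : (ps ++ [k]).count k = ps.count k + 1 := by simp [List.count_append]
        rw [hc1]
        congr 1
        rcases Nat.even_or_odd (ps.count k) with h | h
        · simp [Nat.even_iff.1 h, Nat.add_mod]
        · simp [Nat.odd_iff.1 h, Nat.add_mod]
      · have : (ps ++ [x]).count k = ps.count k := by
          simp [List.count_append, Ne.symm hkx]
        simp [Function.comp, hkx, this]
    · have hmem : x ∉ ps := fun h => hx ((PySem.Set.mem_ofList ps x).2 h)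
      have hcont : D.contains x = false := by
        rw [← Bool.not_eq_true, PySem.Dict.contains_iff_mem_keys, hkeys]; exact hx
      have hgd : D.getD x false = false := PySem.Dict.getD_of_not_contains D false hcont
      rw [List.foldl_cons, List.foldl_nil, PySem.Dict.items_insert_of_not_contains D _ hcont,
        PySem.Set.add_of_not_mem hx, ih, List.map_append, hgd]
      congr 1
      · apply List.map_congr_left
        intro k hk
        have hkx : k ≠ x := fun h => hx (h ▸ hk)
        have : (ps ++ [x]).count k = ps.count k := by
          simp [List.count_append, Ne.symm hkx]
        simp [this]
      · have : (ps ++ [x]).count x = ps.count x + 1 := by simp [List.count_append]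
        simp [List.count_eq_zero_of_not_mem hmem]

-- B's assignment loop: every key is written the same key-determined value, so the result is
-- the map of that value over the distinct keys in first-occurrence order.
theorem assign_items (f : (Int × Int) → Bool) (ts : List (Int × Int)) :
    (ts.foldl (fun (b : PySem.Dict (Int × Int) Bool) t => b.insert t (f t))
      PySem.Dict.empty).items
    = (PySem.Set.ofList ts).map (fun k => (k, f k)) := by
  induction ts using List.reverseRecOn with
  | nil => rfl
  | append_singleton ts x ih =>
    rw [List.foldl_append, List.foldl_cons, List.foldl_nil]
    set D := ts.foldl (fun (b : PySem.Dict (Int × Int) Bool) t => b.insert t (f t)) PySem.Dict.empty with hD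
    have hkeys : D.keys = PySem.Set.ofList ts := by
      rw [hD, PySem.Dict.keys_foldl_insert]
      simp [PySem.Set.update_nil_left]
    rw [PySem.Set.ofList_append_singleton]
    by_cases hx : x ∈ PySem.Set.ofList ts
    · have hcont : D.contains x = true := by
        rw [PySem.Dict.contains_iff_mem_keys, hkeys]; exact hx
      rw [PySem.Dict.items_insert_of_contains D _ hcont, PySem.Set.add_of_mem hx, ih,
        List.map_map]
      apply List.map_congr_left
      intro k hk
      by_cases hkx : k = x
      · subst hkx; simp [Function.comp]
      · simp [Function.comp, hkx]
    · have hcont : D.contains x = false := by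
        rw [← Bool.not_eq_true, PySem.Dict.contains_iff_mem_keys, hkeys]; exact hx
      rw [PySem.Dict.items_insert_of_not_contains D _ hcont, PySem.Set.add_of_not_mem hx, ih,
        List.map_append]
      rfl

-- On the six valid labels, A's vector-sum loop equals B's count-based closed form.
theorem finalTile_acc (instruction : List String)
    (h : ∀ d ∈ instruction, d ∈ ["e", "se", "sw", "w", "nw", "ne"]) : ∀ p : Int × Int,
    instruction.foldl (fun p d =>
      match dirsDict.get? d with
      | some dv => (p.1 + dv.1, p.2 + dv.2)
      | none => p) p
    = (p.1 + (instruction.count "e" : Int) + instruction.count "se"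
         - instruction.count "w" - instruction.count "nw",
       p.2 + (instruction.count "ne" : Int) + instruction.count "nw"
         - instruction.count "se" - instruction.count "sw") := by
  induction instruction with
  | nil => intro p; simp
  | cons d rest ih =>
    intro p
    have hd : d ∈ ["e", "se", "sw", "w", "nw", "ne"] := h d (List.mem_cons_self)
    have hrest : ∀ x ∈ rest, x ∈ ["e", "se", "sw", "w", "nw", "ne"] :=
      fun x hx => h x (List.mem_cons_of_mem d hx)
    have g1 : dirsDict.get? "e" = some (1, 0) := by decide
    have g2 : dirsDict.get? "se" = some (1, -1) := by decide
    have g3 : dirsDict.get? "sw" = some (0, -1) := by decide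
    have g4 : dirsDict.get? "w" = some (-1, 0) := by decide
    have g5 : dirsDict.get? "nw" = some (-1, 1) := by decide
    have g6 : dirsDict.get? "ne" = some (0, 1) := by decide
    rw [List.foldl_cons]
    fin_cases hd <;>
      simp only [g1, g2, g3, g4, g5, g6] <;>
      rw [ih hrest] <;>
      refine Prod.ext ?_ ?_ <;>
      · simp only [List.count_cons]
        push_cast
        first
        | omega
        | (norm_num; try omega)

theorem tileB_eq_finalTile (instruction : List String)
    (h : ∀ d ∈ instruction, d ∈ ["e", "se", "sw", "w", "nw", "ne"]) :
    tileB instruction = finalTile instruction := by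
  rw [tileB, finalTile, finalTile_acc instruction h]
  simp only [PySem.Dict.getD_counter, Prod.mk.injEq]
  constructor <;> ring

theorem apply_eq_alt (instructions : List (List String))
    (hpre : Pre_apply instructions) : apply instructions = apply_alt instructions := by
  have htiles : instructions.map tileB = instructions.map finalTile := by
    apply List.map_congr_left
    intro ins hins
    apply tileB_eq_finalTile
    intro d hd
    have h1 := List.all_eq_true.1 hpre ins hins
    have h2 := List.all_eq_true.1 h1 d hd
    simpa using h2
  simp only [apply, apply_alt, htiles]
  set ps := instructions.map finalTile with hps
  have hA : instructions.foldl (fun (b : PySem.Dict (Int × Int) Bool) instruction =>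
      let uv := finalTile instruction
      b.insert uv (!(b.getD uv false))) PySem.Dict.empty
      = ps.foldl (fun b k => b.insert k (!(b.getD k false))) PySem.Dict.empty := by
    rw [hps, List.foldl_map]
  rw [hA, toggle_items, assign_items]
  apply congrArg
  apply List.map_congr_left
  intro k hk
  have hm : PySem.Int.mod ((ps.count k : Nat) : Int) 2 = ((ps.count k % 2 : Nat) : Int) := by
    exact_mod_cast PySem.Int.mod_natCast (ps.count k) 2
  simp only [PySem.List.count_eq, hm, Prod.mk.injEq, true_and, decide_eq_decide]
  omega

-- ===== VERDICT (by name: the statements are the Claim_ definitions above) =====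
theorem apply_spec : Claim_equal_apply := by
  intro instructions _ hpre
  unfold Spec_apply
  exact apply_eq_alt instructions hpre
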